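-- pv_equiv track=rewrite | github.com/matt-manes/jobglob | helpers.py | get_url_candidate_names
-- ===== SOURCE A (Python) =====
-- from string import ascii_letters, digits
--
-- def get_url_candidate_names(company: str) -> list[str]:
--     """Returns permutations of a company name to try in a url.
--
--     e.g. "Company Inc." returns
--     "companyinc"
--     "company-inc"
--     "company inc"
--     "CompanyInc"
--     """
--     alphanum = ascii_letters + digits + " -"
--     candidates = [company]
--     company_parts = company.split()
--     candidates.extend(["".join(company_parts), "-".join(company_parts)])
--     candidates.extend([candidate.lower() for candidate in candidates])
--     candidates.extend(
--         ["".join(ch for ch in candidate if ch in alphanum) for candidate in candidates]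
--     )
--     return list(set(candidates))
-- ===== SOURCE B (Python) =====
-- from string import ascii_letters, digits
--
--
-- def get_url_candidate_names(company: str) -> list[str]:
--     """Returns permutations of a company name to try in a url."""
--     # One character scan builds the whitespace-collapsed ("joined") and
--     # hyphen-collapsed ("hyphened") forms, instead of split()+join().
--     joined: list[str] = []
--     hyphened: list[str] = []
--     pending = False
--     for ch in company:
--         if ch.isspace():
--             pending = bool(joined)
--         else:
--             if pending:
--                 hyphened.append("-")
--                 pending = False
--             joined.append(ch)
--             hyphened.append(ch)
--     bases = [company, "".join(joined), "".join(hyphened)]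
--
--     allowed = set(ascii_letters + digits + " -")
--
--     def scrub(s: str) -> str:
--         return "".join(ch for ch in s if ch in allowed)
--
--     out: list[str] = []
--     seen: set[str] = set()
--     for xform in (lambda s: s, scrub):
--         for case in (lambda s: s, str.lower):
--             for base in bases:
--                 cand = xform(case(base))
--                 if cand not in seen:
--                     seen.add(cand)
--                     out.append(cand)
--     return out
-- ===== Notes on version B (the rewrite author's own statement) =====
-- stated objective: alternative
-- what changed: B replaces A's split()/join() pipeline and cascading self-extending candidate list with a single character-level scan (a small state machine with a pending-separator flag) that builds the whitespace-collapsed and hyphen-collapsed forms in one pass, then enumerates the twelve candidates by composing the transform families (identity/scrub x identity/lower) over the three bases in a nested loop with an ordered seen-set dedup, instead of A's three extends plus a final list(set(...)).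
import Mathlib
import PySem

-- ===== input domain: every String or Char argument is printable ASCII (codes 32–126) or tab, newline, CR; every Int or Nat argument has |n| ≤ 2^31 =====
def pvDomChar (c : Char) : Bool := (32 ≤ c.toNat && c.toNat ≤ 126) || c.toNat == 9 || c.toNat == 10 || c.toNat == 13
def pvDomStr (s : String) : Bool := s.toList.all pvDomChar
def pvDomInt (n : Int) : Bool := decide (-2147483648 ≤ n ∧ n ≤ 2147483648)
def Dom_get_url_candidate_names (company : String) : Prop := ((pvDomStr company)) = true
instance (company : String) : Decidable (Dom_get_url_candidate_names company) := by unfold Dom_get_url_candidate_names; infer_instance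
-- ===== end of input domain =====

-- B builds the joined/hyphenated bases by one character scan (a pending-separator state
-- machine) instead of split()+join(), and enumerates the candidates by composing the two
-- transform families over the three bases in a nested loop with an ordered seen-set dedup
-- instead of A's cascading extends plus list(set(...)). A's Python returns list(set(...)),
-- whose element ORDER is hash-dependent: both ports (and the equivalence) are about the
-- resulting SET, rendered in first-occurrence order.

-- ===== PORT A =====
-- ascii_letters + digits + " -"
def pvAlphanum : List Char :=
  "abcdefghijklmnopqrstuvwxyzABCDEFGHIJKLMNOPQRSTUVWXYZ0123456789 -".toList

-- "".join(ch for ch in candidate if ch in alphanum); 'ch in alphanum' on a 1-char ch is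
-- exactly char membership in the string's characters.
def pvFilterA (alphanum : List Char) (s : String) : String :=
  String.ofList (s.toList.filter (fun ch => alphanum.contains ch))

def get_url_candidate_names (company : String) : List String :=
  let alphanum := pvAlphanum
  let candidates := [company]
  let company_parts := PySem.Str.split₀ company
  let candidates := candidates ++
    [PySem.Str.join "" company_parts, PySem.Str.join "-" company_parts]
  let candidates := candidates ++ candidates.map (fun c => PySem.Str.lower c)
  let candidates := candidates ++ candidates.map (fun c => pvFilterA alphanum c)
  PySem.Set.ofList candidates   -- list(set(candidates)): first-occurrence order (see header)

-- ===== PORT B =====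
-- loop body of B's character scan, state (joined, hyphened, pending)
def pvStep (st : List Char × List Char × Bool) (ch : Char) : List Char × List Char × Bool :=
  if PySem.Chars.isspace ch then
    (st.1, st.2.1, !st.1.isEmpty)          -- pending = bool(joined)
  else
    let hyphened := if st.2.2 then st.2.1 ++ ['-'] else st.2.1   -- if pending: append '-'
    (st.1 ++ [ch], hyphened ++ [ch], false)

-- scrub(s): chars of s that are in the allowed set
def pvScrub (s : String) : String :=
  String.ofList (s.toList.filter (fun ch => PySem.Set.contains (PySem.Set.ofList pvAlphanum) ch))

-- if cand not in seen: seen.add(cand); out.append(cand)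
def pvDedupStep (st : List String × PySem.Set String) (cand : String) :
    List String × PySem.Set String :=
  if PySem.Set.contains st.2 cand then st else (st.1 ++ [cand], PySem.Set.add st.2 cand)

def get_url_candidate_names_alt (company : String) : List String :=
  let scan := company.toList.foldl pvStep ([], [], false)
  let bases := [company, String.ofList scan.1, String.ofList scan.2.1]
  let xforms : List (String → String) := [fun s => s, pvScrub]
  let cases : List (String → String) := [fun s => s, PySem.Str.lower]
  (xforms.foldl (fun st g =>
      cases.foldl (fun st f =>
        bases.foldl (fun st b => pvDedupStep st (g (f b))) st) st)
    ([], PySem.Set.empty)).1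

-- ===== PRECONDITION & SPEC =====
def Spec_get_url_candidate_names (company : String) (out : List String) : Prop := out = get_url_candidate_names_alt company
instance (company : String) (out : List String) : Decidable (Spec_get_url_candidate_names company out) := by unfold Spec_get_url_candidate_names; infer_instance

-- ===== CLAIM (what is proved, stated in full; the proofs are below) =====
def Claim_equal_get_url_candidate_names : Prop := ∀ (company : String), Dom_get_url_candidate_names company → Spec_get_url_candidate_names company (get_url_candidate_names company)

-- ===== LEMMAS AND PROOFS =====

-- the joined/hyphened string the scan has built, as a function of split₀.go's state:
-- words collected so far are acc.reverse, the current (reversed) word is cur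
def pvG (sep : List Char) (cur : List Char) (acc : List (List Char)) : List Char :=
  List.intercalate sep acc.reverse ++ (if acc.isEmpty || cur.isEmpty then [] else sep) ++ cur.reverse

theorem pvIntercalate_append_singleton (sep w : List Char) (l : List (List Char)) :
    List.intercalate sep (l ++ [w]) =
      (if l.isEmpty then [] else List.intercalate sep l ++ sep) ++ w := by
  induction l with
  | nil => simp [List.intercalate]
  | cons x xs ih =>
    cases xs with
    | nil => simp [List.intercalate, List.intersperse]
    | cons y ys =>
      simp only [List.cons_append, List.intercalate, List.intersperse] at *
      simp_all

theorem pvG_eq_intercalate (sep : List Char) (c : Char) (cur : List Char)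
    (acc : List (List Char)) :
    pvG sep (c :: cur) acc = List.intercalate sep (acc.reverse ++ [(c :: cur).reverse]) := by
  rw [pvIntercalate_append_singleton]
  cases acc <;> simp [pvG, List.intercalate]

theorem pvIntercalate_nil_eq_flatten (l : List (List Char)) :
    List.intercalate ([] : List Char) l = l.flatten := by
  induction l with
  | nil => rfl
  | cons x xs ih =>
    cases xs with
    | nil => simp [List.intercalate]
    | cons y ys => simp_all [List.intercalate, List.intersperse]

-- completing the current word leaves both join strings unchanged
theorem pvG_flush (sep : List Char) (c : Char) (cur : List Char) (acc : List (List Char)) :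
    pvG sep [] ((c :: cur).reverse :: acc) = pvG sep (c :: cur) acc := by
  simp only [pvG, List.reverse_cons, List.isEmpty_cons, Bool.or_false, List.isEmpty_nil,
    Bool.or_true, if_true, List.reverse_nil, List.append_nil]
  rw [pvIntercalate_append_singleton]
  cases acc <;> simp [List.intercalate]

-- between words, joined is empty iff no word has been collected (words are nonempty)
theorem pvG_nil_empty_iff (acc : List (List Char)) (hacc : ∀ w ∈ acc, w ≠ []) :
    (pvG [] [] acc).isEmpty = acc.isEmpty := by
  simp only [pvG, ite_self, List.append_nil, List.reverse_nil]
  rw [pvIntercalate_nil_eq_flatten]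
  cases acc with
  | nil => simp
  | cons x xs =>
    have hx : x ≠ [] := hacc x (by simp)
    simp only [List.isEmpty_cons, Bool.eq_false_iff, ne_eq, List.isEmpty_iff]
    intro h
    rw [List.flatten_eq_nil_iff] at h
    exact hx (h x (by simp))

-- B's scan, started from the state matching split₀.go's (cur, acc), computes the
-- ""-join and "-"-join of the words split₀.go produces
theorem pvScan_go (cs : List Char) : ∀ (cur : List Char) (acc : List (List Char)),
    (∀ w ∈ acc, w ≠ []) →
    ∃ p, cs.foldl pvStep (pvG [] cur acc, pvG ['-'] cur acc, cur.isEmpty && !acc.isEmpty)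
      = (List.intercalate [] (PySem.Chars.split₀.go cs cur acc),
         List.intercalate ['-'] (PySem.Chars.split₀.go cs cur acc), p) := by
  induction cs with
  | nil =>
    intro cur acc hacc
    refine ⟨cur.isEmpty && !acc.isEmpty, ?_⟩
    simp only [List.foldl_nil, PySem.Chars.split₀.go]
    cases cur with
    | nil => simp [pvG]
    | cons c cur' => simp [pvG_eq_intercalate]
  | cons c rest ih =>
    intro cur acc hacc
    rw [List.foldl_cons]
    by_cases hsp : PySem.Chars.isspace c = true
    · cases cur with
      | nil =>
        have hgo : PySem.Chars.split₀.go (c :: rest) [] acc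
            = PySem.Chars.split₀.go rest [] acc := by
          simp [PySem.Chars.split₀.go, hsp]
        have hstep : pvStep (pvG [] [] acc, pvG ['-'] [] acc,
              (List.nil : List Char).isEmpty && !acc.isEmpty) c
            = (pvG [] [] acc, pvG ['-'] [] acc, (List.nil : List Char).isEmpty && !acc.isEmpty) := by
          simp [pvStep, hsp, pvG_nil_empty_iff acc hacc]
        rw [hgo, hstep]
        exact ih [] acc hacc
      | cons c' cur' =>
        have hgo : PySem.Chars.split₀.go (c :: rest) (c' :: cur') acc
            = PySem.Chars.split₀.go rest [] ((c' :: cur').reverse :: acc) := by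
          simp [PySem.Chars.split₀.go, hsp]
        have hne : (pvG [] (c' :: cur') acc).isEmpty = false := by
          rw [pvG_eq_intercalate, pvIntercalate_nil_eq_flatten]
          simp
        have hstep : pvStep (pvG [] (c' :: cur') acc, pvG ['-'] (c' :: cur') acc,
              (c' :: cur').isEmpty && !acc.isEmpty) c
            = (pvG [] [] ((c' :: cur').reverse :: acc), pvG ['-'] [] ((c' :: cur').reverse :: acc),
              (List.nil : List Char).isEmpty && !((c' :: cur').reverse :: acc).isEmpty) := by
          simp only [pvStep, hsp, if_true, hne, Bool.not_false, List.isEmpty_nil,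
            List.isEmpty_cons, Bool.true_and, Prod.mk.injEq]
          refine ⟨?_, ?_, by simp⟩
          · simpa using (pvG_flush [] c' cur' acc).symm
          · simpa using (pvG_flush ['-'] c' cur' acc).symm
        rw [hgo, hstep]
        refine ih [] ((c' :: cur').reverse :: acc) ?_
        intro w hw
        rcases List.mem_cons.mp hw with h | h
        · subst h; simp
        · exact hacc w h
    · have hgo : PySem.Chars.split₀.go (c :: rest) cur acc
          = PySem.Chars.split₀.go rest (c :: cur) acc := by
        simp [PySem.Chars.split₀.go, hsp]
      have hj : pvG [] cur acc ++ [c] = pvG [] (c :: cur) acc := by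
        simp [pvG]
      have hh : (if cur.isEmpty && !acc.isEmpty then pvG ['-'] cur acc ++ ['-']
            else pvG ['-'] cur acc) ++ [c] = pvG ['-'] (c :: cur) acc := by
        cases cur <;> cases acc <;> simp [pvG]
      have hstep : pvStep (pvG [] cur acc, pvG ['-'] cur acc, cur.isEmpty && !acc.isEmpty) c
          = (pvG [] (c :: cur) acc, pvG ['-'] (c :: cur) acc,
            (c :: cur).isEmpty && !acc.isEmpty) := by
        simp only [pvStep, hsp, Bool.false_eq_true, if_false, List.isEmpty_cons,
          Bool.false_and, Prod.mk.injEq]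
        exact ⟨hj, hh, trivial⟩
      rw [hgo, hstep]
      exact ih (c :: cur) acc hacc

-- B's scanned joined string is A's "".join(company.split())
theorem pvScan_joined (s : String) :
    String.ofList (s.toList.foldl pvStep ([], [], false)).1 =
      PySem.Str.join "" (PySem.Str.split₀ s) := by
  obtain ⟨p, hp⟩ := pvScan_go s.toList [] [] (by simp)
  simp only [pvG] at hp
  norm_num at hp
  have hp' : List.foldl pvStep ([], [], false) s.toList
      = ([].intercalate (PySem.Chars.split₀.go s.toList [] []),
         ['-'].intercalate (PySem.Chars.split₀.go s.toList [] []), p) := hp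
  simp only [PySem.Str.join, PySem.Str.split₀, PySem.Chars.split₀, PySem.Chars.join]
  rw [hp']
  simp [List.intercalate, Function.comp_def]

-- B's scanned hyphened string is A's "-".join(company.split())
theorem pvScan_hyphened (s : String) :
    String.ofList (s.toList.foldl pvStep ([], [], false)).2.1 =
      PySem.Str.join "-" (PySem.Str.split₀ s) := by
  obtain ⟨p, hp⟩ := pvScan_go s.toList [] [] (by simp)
  simp only [pvG] at hp
  norm_num at hp
  have hp' : List.foldl pvStep ([], [], false) s.toList
      = ([].intercalate (PySem.Chars.split₀.go s.toList [] []),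
         ['-'].intercalate (PySem.Chars.split₀.go s.toList [] []), p) := hp
  simp only [PySem.Str.join, PySem.Str.split₀, PySem.Chars.split₀, PySem.Chars.join]
  rw [hp']
  simp [List.intercalate, Function.comp_def]

-- membership in set(chars) is membership in chars, so B's scrub is A's filter
theorem pvScrub_eq_filterA (s : String) : pvScrub s = pvFilterA pvAlphanum s := by
  simp [pvScrub, pvFilterA, PySem.Set.contains]

-- B's out list always equals its seen set, so each dedup step is Set.add on both
theorem pvDedupStep_pair (s : PySem.Set String) (c : String) :
    pvDedupStep (s, s) c = (PySem.Set.add s c, PySem.Set.add s c) := by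
  unfold pvDedupStep
  by_cases h : c ∈ s <;> simp [PySem.Set.add, PySem.Set.contains, h]

-- ===== VERDICT (by name: the statement is the Claim_ definition above) =====
theorem get_url_candidate_names_spec : Claim_equal_get_url_candidate_names := by
  intro company _
  unfold Spec_get_url_candidate_names
  simp only [get_url_candidate_names, get_url_candidate_names_alt, List.foldl_cons,
    List.foldl_nil]
  rw [PySem.Set.ofList_eq_foldl]
  simp only [List.map_cons, List.map_nil, List.cons_append, List.nil_append,
    List.foldl_cons, List.foldl_nil]
  have e0 : (([], PySem.Set.empty) : List String × PySem.Set String)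
      = (([], []) : List String × PySem.Set String) := rfl
  rw [e0]
  simp only [pvDedupStep_pair, pvScrub_eq_filterA, pvScan_joined, pvScan_hyphened]
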